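-- pv_equiv track=rewrite | github.com/limjaein/LeetCode | 0006-zigzag-conversion/0006-zigzag-conversion.py | getColNum
-- ===== SOURCE A (Python) =====
-- def getColNum(s, r):
--     c = 0
--     l = len(s)
--
--     while l > 0:
--         l -= r
--         c += 1
--
--         if l > 0:
--             n = min(l, r - 2)
--             l -= n
--             c += n
--     return c
-- ===== SOURCE B (Python) =====
-- def getColNum(s, r):
--     # Closed-form column count: one full zigzag cycle of 2r-2 characters
--     # occupies r-1 columns; the remainder adds 1 column (vertical part)
--     # plus one per leftover diagonal character.
--     l = len(s)
--     if l == 0: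
--         return 0
--     if r <= 1:
--         return l
--     q, rem = divmod(l, 2 * r - 2)
--     if rem == 0:
--         extra = 0
--     elif rem <= r:
--         extra = 1
--     else:
--         extra = 1 + (rem - r)
--     return q * (r - 1) + extra
-- ===== Notes on version B (the rewrite author's own statement) =====
-- stated objective: alternative
-- what changed: Replaces A's cycle-peeling while-loop with closed-form divmod arithmetic on the zigzag cycle length 2r-2.
import Mathlib
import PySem

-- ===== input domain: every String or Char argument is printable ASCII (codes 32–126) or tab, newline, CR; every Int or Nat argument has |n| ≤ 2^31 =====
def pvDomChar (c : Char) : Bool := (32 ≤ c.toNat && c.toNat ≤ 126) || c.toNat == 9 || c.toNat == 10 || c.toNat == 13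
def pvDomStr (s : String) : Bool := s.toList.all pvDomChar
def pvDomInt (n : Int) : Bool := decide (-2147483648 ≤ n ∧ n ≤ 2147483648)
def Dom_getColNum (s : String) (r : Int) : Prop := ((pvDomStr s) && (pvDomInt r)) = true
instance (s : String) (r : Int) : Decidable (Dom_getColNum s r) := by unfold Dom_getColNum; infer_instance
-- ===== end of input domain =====

-- B replaces A's cycle-peeling while-loop by closed-form divmod arithmetic on the cycle length 2r-2 (alternative algorithm).


-- ===== PORT A =====
-- fuel-based transliteration of A's while loop; fuel s.length+1 suffices on Pre_
def getColNumLoop (r : Int) : Nat → Int → Int → Int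
  | 0, _, c => c
  | fuel+1, l, c =>
    if l > 0 then
      let l1 := l - r
      let c1 := c + 1
      if l1 > 0 then
        let n := min l1 (r - 2)
        getColNumLoop r fuel (l1 - n) (c1 + n)
      else
        getColNumLoop r fuel l1 c1
    else c

def getColNum (s : String) (r : Int) : Int :=
  getColNumLoop r (s.length + 1) (s.length : Int) 0

-- ===== PORT B =====
def getColNum_alt (s : String) (r : Int) : Int :=
  let l : Int := (s.length : Int)
  if l = 0 then 0
  else if r ≤ 1 then l
  else
    let q := PySem.Int.floordiv l (2 * r - 2)
    let rem := PySem.Int.mod l (2 * r - 2)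
    let extra : Int := if rem = 0 then 0 else if rem ≤ r then 1 else 1 + (rem - r)
    q * (r - 1) + extra

-- ===== PRECONDITION & SPEC =====
-- Pre_ excludes exactly the inputs on which A's while loop never terminates
-- (r ≤ 0 with a nonempty string, and r = 1 with length ≥ 2); A returns on all admitted inputs.
def Pre_getColNum (s : String) (r : Int) : Prop :=
  s.length = 0 ∨ 2 ≤ r ∨ (r = 1 ∧ s.length = 1)
instance (s : String) (r : Int) : Decidable (Pre_getColNum s r) := by
  unfold Pre_getColNum; infer_instance

def pvWitness_getColNum : String × Int := ("abcdefgh", 3)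

def Spec_getColNum (s : String) (r : Int) (out : Int) : Prop := out = getColNum_alt s r
instance (s : String) (r : Int) (out : Int) : Decidable (Spec_getColNum s r out) := by
  unfold Spec_getColNum; infer_instance

-- ===== CLAIM (what is proved, stated in full; the proofs are below) =====
def Claim_equal_getColNum : Prop :=
  ∀ (s : String) (r : Int), Dom_getColNum s r → Pre_getColNum s r →
    Spec_getColNum s r (getColNum s r)

-- ===== LEMMAS AND PROOFS =====

-- closed form of the column count, as a function of the remaining length
def cform (r l : Int) : Int :=
  if l ≤ 0 then 0
  else
    PySem.Int.floordiv l (2 * r - 2) * (r - 1) +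
      (if PySem.Int.mod l (2 * r - 2) = 0 then 0
       else if PySem.Int.mod l (2 * r - 2) ≤ r then 1
       else 1 + (PySem.Int.mod l (2 * r - 2) - r))

lemma loop_nonpos (r : Int) (fuel : Nat) (l c : Int) (h : l ≤ 0) :
    getColNumLoop r fuel l c = c := by
  cases fuel with
  | zero => rfl
  | succ n => simp [getColNumLoop]; omega

lemma fdiv_sub_self (l d : Int) (hd : 0 < d) :
    PySem.Int.floordiv (l - d) d = PySem.Int.floordiv l d - 1 := by
  rw [PySem.Int.floordiv_eq_ediv_of_pos hd, PySem.Int.floordiv_eq_ediv_of_pos hd]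
  have h := Int.add_mul_ediv_right l (-1) (ne_of_gt hd)
  have : l - d = l + (-1) * d := by ring
  rw [this, h]; ring

lemma mod_sub_self (l d : Int) (hd : 0 < d) :
    PySem.Int.mod (l - d) d = PySem.Int.mod l d := by
  rw [PySem.Int.mod_eq_emod_of_pos hd, PySem.Int.mod_eq_emod_of_pos hd]
  exact Int.sub_emod_right l d

lemma fdiv_small (l d : Int) (h0 : 0 ≤ l) (h : l < d) :
    PySem.Int.floordiv l d = 0 := by
  rw [PySem.Int.floordiv_eq_ediv_of_pos (by omega)]
  exact Int.ediv_eq_zero_of_lt h0 h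

lemma mod_small (l d : Int) (h0 : 0 ≤ l) (h : l < d) :
    PySem.Int.mod l d = l := by
  rw [PySem.Int.mod_eq_emod_of_pos (by omega)]
  exact Int.emod_eq_of_lt h0 h

lemma cform_step (r l : Int) (hr : 2 ≤ r) (hl : 2 * r - 2 ≤ l) :
    cform r l = (r - 1) + cform r (l - (2 * r - 2)) := by
  set d := 2 * r - 2 with hd
  have hdpos : 0 < d := by omega
  by_cases h0 : l - d ≤ 0
  · have hld : l = d := by omega
    have h1 : PySem.Int.floordiv l d = 1 := by
      have := fdiv_sub_self l d hdpos
      rw [hld] at this ⊢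
      have z : PySem.Int.floordiv (d - d) d = 0 := by
        rw [show d - d = 0 by ring]; exact fdiv_small 0 d le_rfl hdpos
      omega
    have h2 : PySem.Int.mod l d = 0 := by
      have := mod_sub_self l d hdpos
      rw [hld] at this ⊢
      rw [show d - d = 0 by ring] at this
      rw [← this]; exact mod_small 0 d le_rfl hdpos
    unfold cform
    rw [if_neg (by omega), if_pos h0, h1, h2]
    simp
  · unfold cform
    rw [if_neg (by omega), if_neg h0, fdiv_sub_self l d hdpos, mod_sub_self l d hdpos]
    ring

lemma loop_eq_cform (r : Int) (hr : 2 ≤ r) :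
    ∀ (fuel : Nat) (l c : Int), l ≤ (fuel : Int) →
      getColNumLoop r fuel l c = c + cform r l := by
  intro fuel
  induction fuel with
  | zero =>
    intro l c hfl
    rw [loop_nonpos r 0 l c (by exact_mod_cast hfl)]
    unfold cform
    rw [if_pos (by exact_mod_cast hfl)]; ring
  | succ n ih =>
    intro l c hfl
    by_cases hl : l ≤ 0
    · rw [loop_nonpos r (n+1) l c hl]
      unfold cform; rw [if_pos hl]; ring
    · set d := 2 * r - 2 with hd
      have hdpos : 0 < d := by omega
      by_cases hbig : d ≤ l
      · -- one full cycle: state becomes (l - d, c + (r-1))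
        have hstep : getColNumLoop r (n+1) l c
            = getColNumLoop r n (l - d) (c + (r - 1)) := by
          show (if l > 0 then
                  let l1 := l - r
                  let c1 := c + 1
                  if l1 > 0 then
                    let n' := min l1 (r - 2)
                    getColNumLoop r n (l1 - n') (c1 + n')
                  else getColNumLoop r n l1 c1
                else c) = _
          rw [if_pos (by omega)]
          by_cases h1 : l - r > 0
          · simp only [if_pos h1]
            have hmin : min (l - r) (r - 2) = r - 2 := by
              apply min_eq_right; omega
            rw [hmin]
            congr 1 <;> omega
          · -- forces r = 2 (so d = r) and l - r ≤ 0
            simp only [if_neg h1]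
            congr 1 <;> omega
        rw [hstep, ih (l - d) (c + (r - 1)) (by push_cast at hfl ⊢; omega),
            cform_step r l hr hbig]
        ring
      · -- last partial cycle: 0 < l < d
        have hq : PySem.Int.floordiv l d = 0 := fdiv_small l d (by omega) (by omega)
        have hm : PySem.Int.mod l d = l := mod_small l d (by omega) (by omega)
        have hcf : cform r l = if l ≤ r then 1 else 1 + (l - r) := by
          unfold cform
          rw [if_neg (by omega), hq, hm, if_neg (by omega)]
          split_ifs <;> ring
        show (if l > 0 then
                let l1 := l - r
                let c1 := c + 1
                if l1 > 0 then
                  let n' := min l1 (r - 2)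
                  getColNumLoop r n (l1 - n') (c1 + n')
                else getColNumLoop r n l1 c1
              else c) = c + cform r l
        rw [if_pos (by omega)]
        by_cases h1 : l - r > 0
        · simp only [if_pos h1]
          have hmin : min (l - r) (r - 2) = l - r := by
            apply min_eq_left; omega
          rw [hmin, loop_nonpos r n _ _ (by omega), hcf, if_neg (by omega)]
          ring
        · simp only [if_neg h1]
          rw [loop_nonpos r n _ _ (by omega), hcf, if_pos (by omega)]

-- ===== VERDICT (by name: the statement is the Claim_ definition above) =====
theorem getColNum_spec : Claim_equal_getColNum := by
  intro s r _ hpre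
  unfold Spec_getColNum getColNum getColNum_alt Pre_getColNum at *
  rcases hpre with h0 | hr | ⟨hr, h1⟩
  · rw [h0]
    simp [loop_nonpos r 1 0 0 le_rfl]
  · rw [loop_eq_cform r hr (s.length + 1) (s.length : Int) 0 (by push_cast; omega),
        zero_add]
    unfold cform
    by_cases hz : (s.length : Int) = 0
    · rw [hz]; simp
    · rw [if_neg (show ¬((s.length : Int) ≤ 0) by omega), if_neg hz,
          if_neg (show ¬(r ≤ 1) by omega)]
  · rw [hr, h1]
    norm_num [getColNumLoop, loop_nonpos]
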